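-- pv_equiv track=rewrite | github.com/alibabaspam99-commits/Project_Penumbra | parser/techniques/multi_line_clustering.py | _cluster_bars
-- ===== SOURCE A (Python) =====
-- from typing import List, Dict, Any, Set, Tuple
--
-- def _cluster_bars(bars: List[Dict[str, Any]], adjacencies: List[Tuple[int, int]]) -> List[Set[int]]:
--     """Use adjacency information to cluster bars into groups."""
--     # Union-find style clustering
--     parent = list(range(len(bars)))
--
--     def find(x):
--         if parent[x] != x:
--             parent[x] = find(parent[x])
--         return parent[x]
--
--     def union(x, y):
--         px, py = find(x), find(y)
--         if px != py:
--             parent[px] = py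
--
--     for i, j in adjacencies:
--         union(i, j)
--
--     # Group bars by their root parent
--     groups_dict = {}
--     for i in range(len(bars)):
--         root = find(i)
--         if root not in groups_dict:
--             groups_dict[root] = []
--         groups_dict[root].append(i)
--
--     return [set(group) for group in groups_dict.values()]
-- ===== SOURCE B (Python) =====
-- def _cluster_bars(bars, adjacencies):
--     """Label-propagation clustering: same components, no union-find."""
--     n = len(bars)
--     labels = list(range(n))
--     for i, j in adjacencies:
--         a, b = labels[i], labels[j]
--         if a != b:
--             labels = [b if l == a else l for l in labels]
--     groups = {}
--     for i, l in enumerate(labels):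
--         groups[l] = groups.get(l, []) + [i]
--     return [set(g) for g in groups.values()]
-- ===== Notes on version B (the rewrite author's own statement) =====
-- stated objective: alternative
-- what changed: Replaces the recursive path-compressing union-find (find/union with parent-array mutation) by flat label propagation: one relabelling pass over the labels array per edge and a single grouping pass, no recursion and no find calls.
import Mathlib
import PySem

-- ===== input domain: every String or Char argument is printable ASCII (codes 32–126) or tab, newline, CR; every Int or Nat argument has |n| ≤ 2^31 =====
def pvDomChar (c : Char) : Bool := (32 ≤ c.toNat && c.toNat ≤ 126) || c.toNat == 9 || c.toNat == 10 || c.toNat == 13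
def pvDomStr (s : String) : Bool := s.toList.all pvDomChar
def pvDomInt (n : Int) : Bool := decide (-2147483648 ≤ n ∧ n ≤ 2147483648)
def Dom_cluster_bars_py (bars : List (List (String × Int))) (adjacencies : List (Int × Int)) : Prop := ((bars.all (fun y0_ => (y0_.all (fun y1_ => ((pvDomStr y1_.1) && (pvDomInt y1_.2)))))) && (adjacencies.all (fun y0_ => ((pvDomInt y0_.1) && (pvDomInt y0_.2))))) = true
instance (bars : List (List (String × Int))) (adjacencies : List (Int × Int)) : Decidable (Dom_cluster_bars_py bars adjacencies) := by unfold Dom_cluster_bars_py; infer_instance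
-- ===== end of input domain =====

-- B replaces A's recursive union-find (path compression) by simple label propagation:
-- one relabelling pass per edge, then one grouping pass; equivalence of the RETURN value is proved.

-- ===== PORT A =====
-- find(x): recursive lookup with path compression; the fuel argument only makes the
-- Python recursion (which terminates on every admitted input) structurally total.
def pvFindA : Nat → List Int → Int → Option (List Int × Int)
  | 0, _, _ => none
  | fuel+1, parent, x =>
    match PySem.List.pyGet? parent x with          -- parent[x] (IndexError = none)
    | none => none
    | some px =>
      if px ≠ x then
        match pvFindA fuel parent px with          -- parent[x] = find(parent[x])
        | none => none
        | some (p1, r) =>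
          match PySem.List.pySet? p1 x r with
          | none => none
          | some p2 =>
            match PySem.List.pyGet? p2 x with      -- return parent[x]
            | none => none
            | some v => some (p2, v)
      else some (parent, px)                       -- return parent[x] (= x)

-- union(x, y)
def pvUnionA (fuel : Nat) (parent : List Int) (x y : Int) : Option (List Int) :=
  match pvFindA fuel parent x with
  | none => none
  | some (p1, px) =>
    match pvFindA fuel p1 y with
    | none => none
    | some (p2, py) =>
      if px ≠ py then PySem.List.pySet? p2 px py else some p2    -- parent[px] = py

-- loop body of the grouping pass: root = find(i); groups_dict bookkeeping
def pvGroupStepA (fuel : Nat) (st : List Int × PySem.Dict Int (List Int)) (i : Int) :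
    List Int × PySem.Dict Int (List Int) :=
  match pvFindA fuel st.1 i with
  | some (p', root) =>
    let d := if st.2.contains root then st.2 else st.2.insert root []   -- if root not in groups_dict: … = []
    (p', d.modify root [] (fun g => g ++ [i]))                          -- groups_dict[root].append(i)
  | none => st

def cluster_bars_py (bars : List (List (String × Int))) (adjacencies : List (Int × Int)) : List (List Int) :=
  let n := bars.length
  let fuel := adjacencies.length + 2               -- fuel guard only; never exhausted on admitted inputs
  let parent : List Int := PySem.List.pyRange 0 n 1    -- parent = list(range(len(bars)))
  let parent := adjacencies.foldl (fun p ij =>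
      match pvUnionA fuel p ij.1 ij.2 with
      | some p' => p'
      | none => p) parent                          -- none = Python raised (outside Pre_)
  let st := (PySem.List.pyRange 0 n 1).foldl (pvGroupStepA fuel) (parent, PySem.Dict.empty)
  st.2.values.map (fun g => PySem.Set.ofList g)    -- [set(group) for group in groups_dict.values()]

-- ===== PORT B =====
-- one edge step: a, b = labels[i], labels[j]; if a != b: relabel a ↦ b everywhere
def pvRelabelB (labels : List Int) (ij : Int × Int) : List Int :=
  match PySem.List.pyGet? labels ij.1, PySem.List.pyGet? labels ij.2 with
  | some a, some b => if a ≠ b then labels.map (fun l => if l = a then b else l) else labels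
  | _, _ => labels                                 -- IndexError in Python (outside Pre_)

def cluster_bars_py_alt (bars : List (List (String × Int))) (adjacencies : List (Int × Int)) : List (List Int) :=
  let n := bars.length
  let labels := adjacencies.foldl pvRelabelB (PySem.List.pyRange 0 n 1)
  let groups := (PySem.List.enumerate labels).foldl
      (fun (d : PySem.Dict Int (List Int)) il => d.insert il.2 (d.getD il.2 [] ++ [il.1])) PySem.Dict.empty
  groups.values.map (fun g => PySem.Set.ofList g)

-- ===== PRECONDITION & SPEC =====
-- Pre_ excludes exactly the inputs on which Python A raises IndexError: an adjacency
-- index outside [-len(bars), len(bars)).  (Negative in-range indices are admitted.)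
def Pre_cluster_bars_py (bars : List (List (String × Int))) (adjacencies : List (Int × Int)) : Prop :=
  ∀ e ∈ adjacencies, PySem.Raise.InRange bars.length e.1 ∧ PySem.Raise.InRange bars.length e.2
instance (bars : List (List (String × Int))) (adjacencies : List (Int × Int)) : Decidable (Pre_cluster_bars_py bars adjacencies) := by unfold Pre_cluster_bars_py; infer_instance

def pvWitness_cluster_bars_py : (List (List (String × Int))) × (List (Int × Int)) :=
  ([[("label", 1)], [], [("label", 2)]], [(0, 2), (-1, 1)])

def Spec_cluster_bars_py (bars : List (List (String × Int))) (adjacencies : List (Int × Int)) (out : List (List Int)) : Prop := out = cluster_bars_py_alt bars adjacencies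
instance (bars : List (List (String × Int))) (adjacencies : List (Int × Int)) (out : List (List Int)) : Decidable (Spec_cluster_bars_py bars adjacencies out) := by unfold Spec_cluster_bars_py; infer_instance

-- ===== CLAIM (what is proved, stated in full; the proofs are below) =====
def Claim_equal_cluster_bars_py : Prop := ∀ (bars : List (List (String × Int))) (adjacencies : List (Int × Int)), Dom_cluster_bars_py bars adjacencies → Pre_cluster_bars_py bars adjacencies → Spec_cluster_bars_py bars adjacencies (cluster_bars_py bars adjacencies)

-- ===== LEMMAS AND PROOFS =====

-- chase parent pointers (no compression): the pure "root of k" function the proofs reason with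
def rootGo : Nat → List Int → Nat → Option Int
  | 0, _, _ => none
  | f+1, p, k =>
    match p[k]? with
    | none => none
    | some v => if v = (k : Int) then some v else if 0 ≤ v then rootGo f p v.toNat else none

-- every parent entry is an index into the array
def pvBnd (p : List Int) : Prop := ∀ (k : Nat) (h : k < p.length), 0 ≤ p[k] ∧ p[k] < (p.length : Int)

-- normalized (Python-wrapped) index
def pyNorm (n : Nat) (x : Int) : Nat := if x < 0 then (x + n).toNat else x.toNat

-- the simulation invariant: B's labels list IS A's root function (at fuel f)
def pvSim (f : Nat) (p L : List Int) : Prop :=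
  p.length = L.length ∧ pvBnd p ∧ ∀ (k : Nat) (h : k < L.length), rootGo f p k = some L[k]

theorem rootGo_mono {p : List Int} : ∀ {f f' : Nat} {k : Nat} {r : Int}, f ≤ f' →
    rootGo f p k = some r → rootGo f' p k = some r := by
  intro f
  induction f with
  | zero => intro f' k r _ h; simp [rootGo] at h
  | succ f ih =>
    intro f' k r hle h
    obtain ⟨f'', rfl⟩ : ∃ f'', f' = f'' + 1 := ⟨f' - 1, by omega⟩
    cases hpk : p[k]? with
    | none => simp [rootGo, hpk] at h
    | some v =>
      simp only [rootGo, hpk] at h ⊢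
      by_cases hv : v = (k : Int)
      · simpa [hv] using h
      · simp only [if_neg hv] at h ⊢
        by_cases h0 : (0 : Int) ≤ v
        · simp only [if_pos h0] at h ⊢; exact ih (by omega) h
        · simp [if_neg h0] at h

theorem rootGo_unique {p : List Int} {f g k : Nat} {v w : Int}
    (hv : rootGo f p k = some v) (hw : rootGo g p k = some w) : v = w := by
  have h1 := rootGo_mono (Nat.le_max_left f g) hv
  have h2 := rootGo_mono (Nat.le_max_right f g) hw
  rw [h1] at h2; exact (Option.some.injEq _ _).mp h2

theorem rootGo_props {p : List Int} {f k : Nat} {r : Int} (hB : pvBnd p) (hk : k < p.length)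
    (h : rootGo f p k = some r) : 0 ≤ r ∧ r < (p.length : Int) ∧ p[r.toNat]? = some r := by
  induction f generalizing k with
  | zero => simp [rootGo] at h
  | succ f ih =>
    have hpk : p[k]? = some p[k] := List.getElem?_eq_getElem hk
    simp only [rootGo, hpk] at h
    obtain ⟨h0, hlt⟩ := hB k hk
    by_cases hv : p[k] = (k : Int)
    · simp only [if_pos hv] at h
      obtain rfl : p[k] = r := (Option.some.injEq _ _).mp h
      refine ⟨h0, hlt, ?_⟩
      rw [hv]; simpa [hv] using hpk
    · simp only [if_neg hv, if_pos h0] at h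
      exact ih (k := p[k].toNat) (by omega) h

theorem rootGo_one {p : List Int} {k : Nat} {r : Int} :
    rootGo 1 p k = some r ↔ p[k]? = some r ∧ r = (k : Int) := by
  constructor
  · intro h
    cases hpk : p[k]? with
    | none => simp [rootGo, hpk] at h
    | some v =>
      simp only [rootGo, hpk] at h
      by_cases hv : v = (k : Int)
      · simp only [if_pos hv] at h
        obtain rfl : v = r := (Option.some.injEq _ _).mp h
        exact ⟨rfl, hv⟩
      · simp only [if_neg hv] at h
        split at h <;> simp at h
  · rintro ⟨hpk, rfl⟩
    simp [rootGo, hpk]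

theorem rootGo_set_root {p : List Int} {x : Nat} {r : Int} {g : Nat}
    (hB : pvBnd p) (hx : x < p.length) (hr : rootGo g p x = some r) :
    ∀ (f k : Nat) (v : Int), rootGo f p k = some v → rootGo f (p.set x r) k = some v := by
  intro f
  induction f with
  | zero => intro k v h; simp [rootGo] at h
  | succ f ih =>
    intro k v h
    cases hpk : p[k]? with
    | none => simp [rootGo, hpk] at h
    | some w =>
      simp only [rootGo, hpk] at h
      by_cases hkx : k = x
      · subst hkx
        have hv : rootGo (f+1) p k = some v := by simp only [rootGo, hpk]; exact h
        obtain rfl : v = r := rootGo_unique hv hr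
        obtain ⟨hr0, hrlt, hrfix⟩ := rootGo_props hB hx hr
        have hset : (p.set k v)[k]? = some v := List.getElem?_set_self hx
        by_cases hw : w = (k : Int)
        · -- p[k] = k : the root of k is k itself
          have hvk : v = (k : Int) := rootGo_unique hr (rootGo_one.mpr ⟨hw ▸ hpk, rfl⟩)
          subst hvk
          simp [rootGo, hset]
        · -- p[k] ≠ k : the written entry is one hop from the root
          simp only [if_neg hw] at h
          have hw0 : (0:Int) ≤ w := by
            by_contra hc; rw [if_neg hc] at h; cases h
          rw [if_pos hw0] at h
          obtain ⟨f', rfl⟩ : ∃ f', f = f' + 1 := by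
            cases f with
            | zero => simp [rootGo] at h
            | succ f' => exact ⟨f', rfl⟩
          have hvk : v ≠ (k : Int) := by
            intro hc
            rw [hc, Int.toNat_natCast, hpk] at hrfix
            exact hw ((Option.some.injEq _ _).mp hrfix)
          have hfix' : (p.set k v)[v.toNat]? = some v := by
            rw [List.getElem?_set_ne (by omega)]; exact hrfix
          have htail : rootGo (f'+1) (p.set k v) v.toNat = some v :=
            rootGo_mono (by omega) (rootGo_one.mpr ⟨hfix', (Int.toNat_of_nonneg hr0).symm⟩)
          simp only [rootGo, hset, if_neg hvk, if_pos hr0]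
          exact htail
      · have hset : (p.set x r)[k]? = some w := by
          rw [List.getElem?_set_ne (by omega)]; exact hpk
        simp only [rootGo, hset]
        by_cases hw : w = (k : Int)
        · simpa [hw] using h
        · simp only [if_neg hw] at h ⊢
          by_cases hw0 : (0:Int) ≤ w
          · simp only [if_pos hw0] at h ⊢; exact ih _ _ h
          · simp [if_neg hw0] at h

theorem rootGo_set_union {p : List Int} {aN bN : Nat}
    (hpa : p[aN]? = some (aN : Int)) (hpb : p[bN]? = some (bN : Int)) (hne : aN ≠ bN) :
    ∀ (f k : Nat) (v : Int), rootGo f p k = some v →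
      rootGo (f+1) (p.set aN (bN : Int)) k = some (if v = (aN : Int) then (bN : Int) else v) := by
  have haN : aN < p.length := by
    by_contra hc
    rw [List.getElem?_eq_none (by omega)] at hpa; cases hpa
  have hsetb : (p.set aN (bN : Int))[bN]? = some (bN : Int) := by
    rw [List.getElem?_set_ne (by omega)]; exact hpb
  intro f
  induction f with
  | zero => intro k v h; simp [rootGo] at h
  | succ f ih =>
    intro k v h
    cases hpk : p[k]? with
    | none => simp [rootGo, hpk] at h
    | some w =>
      simp only [rootGo, hpk] at h
      by_cases hka : k = aN
      · subst hka
        have hwk : w = (k : Int) := by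
          rw [hpa] at hpk; exact ((Option.some.injEq _ _).mp hpk).symm
        subst hwk
        have hv : v = (k : Int) := by simpa using h.symm
        subst hv
        rw [if_pos rfl]
        have hseta : (p.set k (bN : Int))[k]? = some (bN : Int) := List.getElem?_set_self haN
        have hbk : (bN : Int) ≠ (k : Int) := fun hc => hne (by exact_mod_cast hc.symm)
        have htail : rootGo (f+1) (p.set k (bN : Int)) bN = some (bN : Int) :=
          rootGo_mono (by omega) (rootGo_one.mpr ⟨hsetb, rfl⟩)
        simp only [rootGo, hseta, if_neg hbk, if_pos (Int.natCast_nonneg bN), Int.toNat_natCast]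
        exact htail
      · have hset : (p.set aN (bN : Int))[k]? = some w := by
          rw [List.getElem?_set_ne (by omega)]; exact hpk
        by_cases hw : w = (k : Int)
        · have hv : v = (k : Int) := by simpa [hw] using h.symm
          subst hv
          have hva : (k : Int) ≠ (aN : Int) := fun hc => hka (by exact_mod_cast hc)
          rw [if_neg hva]
          exact rootGo_mono (by omega) (rootGo_one.mpr ⟨hw ▸ hset, rfl⟩)
        · simp only [if_neg hw] at h
          have hw0 : (0:Int) ≤ w := by
            by_contra hc; rw [if_neg hc] at h; cases h
          rw [if_pos hw0] at h
          simp only [rootGo, hset, if_neg hw, if_pos hw0]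
          exact ih _ _ h

theorem pyGet?_norm {xs : List Int} {x : Int} (hx : PySem.Raise.InRange xs.length x) :
    PySem.List.pyGet? xs x = xs[pyNorm xs.length x]? := by
  obtain ⟨h1, h2⟩ := hx
  simp only [PySem.List.pyGet?, PySem.List.pyIdx?, pyNorm]
  by_cases h0 : 0 ≤ x
  · rw [if_pos h0, if_pos h2, if_neg (by omega)]; rfl
  · rw [if_neg h0, if_pos h1, if_pos (by omega)]
    simp only [Option.bind_some]
    congr 1
    omega

theorem pvFind_spec : ∀ (F f : Nat) (p : List Int) (k : Nat) (r : Int), pvBnd p → k < p.length →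
    rootGo f p k = some r → f ≤ F →
    ∃ p', pvFindA F p (k : Int) = some (p', r) ∧ p'.length = p.length ∧ pvBnd p' ∧
      ∀ (g k' : Nat) (v : Int), rootGo g p k' = some v → rootGo g p' k' = some v := by
  intro F f
  induction f generalizing F with
  | zero => intro p k r _ _ h _; simp [rootGo] at h
  | succ f ih =>
    intro p k r hB hk h hF
    obtain ⟨F', rfl⟩ : ∃ F', F = F' + 1 := ⟨F - 1, by omega⟩
    have hpk : p[k]? = some p[k] := List.getElem?_eq_getElem hk
    have hget : PySem.List.pyGet? p (k : Int) = some p[k] := by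
      rw [PySem.List.pyGet?_natCast]; exact hpk
    simp only [rootGo, hpk] at h
    have hroot : rootGo (f+1) p k = some r := by simp only [rootGo, hpk]; exact h
    by_cases hv : p[k] = (k : Int)
    · rw [if_pos hv] at h
      obtain rfl : p[k] = r := (Option.some.injEq _ _).mp h
      refine ⟨p, ?_, rfl, hB, fun g k' v hgv => hgv⟩
      simp only [pvFindA, hget]
      rw [if_neg (not_not_intro hv)]
    · rw [if_neg hv] at h
      obtain ⟨h0, hlt⟩ := hB k hk
      rw [if_pos h0] at h
      have hkN : p[k].toNat < p.length := by omega
      obtain ⟨p1, hfind1, hlen1, hB1, hpres1⟩ := ih F' p p[k].toNat r hB hkN h (by omega)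
      rw [Int.toNat_of_nonneg h0] at hfind1
      obtain ⟨hr0, hrlt, _⟩ := rootGo_props hB hk hroot
      have hk1 : k < p1.length := by omega
      have hset : PySem.List.pySet? p1 (k : Int) r = some (p1.set k r) := by
        simp [PySem.List.pySet?, PySem.List.pyIdx?, show ((k:Int) < (p1.length : Int)) by omega]
      have hget2 : PySem.List.pyGet? (p1.set k r) (k : Int) = some r := by
        rw [PySem.List.pyGet?_natCast]; exact List.getElem?_set_self hk1
      have hr1 : rootGo (f+1) p1 k = some r := hpres1 _ _ _ hroot
      refine ⟨p1.set k r, ?_, by simp [hlen1], ?_, ?_⟩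
      · simp only [pvFindA, hget]
        rw [if_pos hv, hfind1]
        simp only [hset, hget2]
      · intro k' hk'
        simp only [List.length_set] at hk' ⊢
        simp only [List.getElem_set]
        split
        · constructor <;> omega
        · obtain ⟨a, b⟩ := hB1 k' (by omega); constructor <;> omega
      · intro g k' v hgv
        exact rootGo_set_root hB1 hk1 hr1 g k' v (hpres1 g k' v hgv)

theorem pvFind_specI (F f : Nat) (p : List Int) (x : Int) (r : Int) (hB : pvBnd p)
    (hx : PySem.Raise.InRange p.length x) (hr : rootGo f p (pyNorm p.length x) = some r)
    (hF : f + 1 ≤ F) :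
    ∃ p', pvFindA F p x = some (p', r) ∧ p'.length = p.length ∧ pvBnd p' ∧
      ∀ (g k' : Nat) (v : Int), rootGo g p k' = some v → rootGo g p' k' = some v := by
  obtain ⟨h1, h2⟩ := hx
  by_cases h0 : 0 ≤ x
  · have hnorm : pyNorm p.length x = x.toNat := by simp [pyNorm, not_lt.mpr h0]
    rw [hnorm] at hr
    obtain ⟨p', hf, hl, hb, hp⟩ := pvFind_spec F f p x.toNat r hB (by omega) hr (by omega)
    rw [Int.toNat_of_nonneg h0] at hf
    exact ⟨p', hf, hl, hb, hp⟩
  · rw [not_le] at h0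
    have hnorm : pyNorm p.length x = (x + p.length).toNat := by simp [pyNorm, h0]
    set nx := pyNorm p.length x with hnx
    have hnxlt : nx < p.length := by omega
    have hpx : p[nx]? = some p[nx] := List.getElem?_eq_getElem hnxlt
    have hget : PySem.List.pyGet? p x = some p[nx] := by rw [pyGet?_norm ⟨h1, h2⟩, ← hnx, hpx]
    obtain ⟨hw0, hwlt⟩ := hB nx hnxlt
    have hnex : p[nx] ≠ x := by omega
    have hfrec : ∃ f1, f1 ≤ f ∧ rootGo f1 p p[nx].toNat = some r ∧ 1 ≤ f := by
      obtain ⟨f', rfl⟩ : ∃ f', f = f' + 1 := by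
        cases f with
        | zero => simp [rootGo] at hr
        | succ f' => exact ⟨f', rfl⟩
      simp only [rootGo, hpx] at hr
      by_cases hv : p[nx] = (nx : Int)
      · rw [if_pos hv] at hr
        obtain rfl : p[nx] = r := (Option.some.injEq _ _).mp hr
        refine ⟨1, by omega, rootGo_one.mpr ⟨?_, ?_⟩, by omega⟩
        · simp [hv, Int.toNat_natCast, hpx]
        · rw [hv, Int.toNat_natCast]
      · rw [if_neg hv, if_pos hw0] at hr
        exact ⟨f', by omega, hr, by omega⟩
    obtain ⟨f1, hf1le, hroot1, hfpos⟩ := hfrec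
    obtain ⟨F', rfl⟩ : ∃ F', F = F' + 1 := ⟨F - 1, by omega⟩
    obtain ⟨p1, hfind1, hlen1, hB1, hpres1⟩ :=
      pvFind_spec F' f1 p p[nx].toNat r hB (by omega) hroot1 (by omega)
    rw [Int.toNat_of_nonneg hw0] at hfind1
    obtain ⟨hr0, hrlt, _⟩ := rootGo_props hB hnxlt hr
    have hnx1 : nx < p1.length := by rw [hlen1]; exact hnxlt
    have hset : PySem.List.pySet? p1 x r = some (p1.set nx r) := by
      simp only [PySem.List.pySet?, PySem.List.pyIdx?, if_neg (not_le.mpr (by omega : x < 0)),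
        if_pos (show -(p1.length : Int) ≤ x by omega), Option.map_some]
      have heq : p1.length - (-x).toNat = nx := by omega
      rw [heq]
    have hget2 : PySem.List.pyGet? (p1.set nx r) x = some r := by
      rw [pyGet?_norm (by constructor <;> (simp only [List.length_set]; omega))]
      have : pyNorm (p1.set nx r).length x = nx := by
        simp only [List.length_set, pyNorm, if_pos h0]; omega
      rw [this]
      exact List.getElem?_set_self hnx1
    have hr1 : rootGo f p1 nx = some r := hpres1 _ _ _ hr
    refine ⟨p1.set nx r, ?_, by simp [hlen1], ?_, ?_⟩
    · simp only [pvFindA, hget]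
      rw [if_pos hnex, hfind1]
      simp only [hset, hget2]
    · intro k' hk'
      simp only [List.length_set] at hk' ⊢
      simp only [List.getElem_set]
      split
      · constructor <;> omega
      · obtain ⟨a, b⟩ := hB1 k' (by omega); constructor <;> omega
    · intro g k' v hgv
      exact rootGo_set_root hB1 hnx1 hr1 g k' v (hpres1 g k' v hgv)

theorem step_union {F f : Nat} {p L : List Int} {i j : Int} (hS : pvSim f p L)
    (hi : PySem.Raise.InRange L.length i) (hj : PySem.Raise.InRange L.length j)
    (hF : f + 1 ≤ F) :
    ∃ p', pvUnionA F p i j = some p' ∧ pvSim (f+1) p' (pvRelabelB L (i, j)) := by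
  obtain ⟨hlen, hB, hsim⟩ := hS
  have hniLt : pyNorm L.length i < L.length := by
    obtain ⟨a, b⟩ := hi; simp only [pyNorm]; split <;> omega
  have hnjLt : pyNorm L.length j < L.length := by
    obtain ⟨a, b⟩ := hj; simp only [pyNorm]; split <;> omega
  set ni := pyNorm L.length i with hni
  set nj := pyNorm L.length j with hnj
  obtain ⟨p1, hf1, hl1, hB1, hp1⟩ :=
    pvFind_specI F f p i L[ni] hB (by rw [hlen]; exact hi)
      (by rw [show pyNorm p.length i = ni by rw [hlen]]; exact hsim ni hniLt) hF
  have hS1 : ∀ (k : Nat) (hk : k < L.length), rootGo f p1 k = some L[k] :=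
    fun k h => hp1 _ _ _ (hsim k h)
  obtain ⟨p2, hf2, hl2, hB2, hp2⟩ :=
    pvFind_specI F f p1 j L[nj] hB1 (by rw [hl1, hlen]; exact hj)
      (by rw [show pyNorm p1.length j = nj by rw [hl1, hlen]]; exact hS1 nj hnjLt) hF
  have hS2 : ∀ (k : Nat) (hk : k < L.length), rootGo f p2 k = some L[k] :=
    fun k h => hp2 _ _ _ (hS1 k h)
  have hlen2 : p2.length = L.length := by rw [hl2, hl1, hlen]
  have hgetLi : PySem.List.pyGet? L i = some L[ni] := by
    rw [pyGet?_norm hi, ← hni]; exact List.getElem?_eq_getElem hniLt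
  have hgetLj : PySem.List.pyGet? L j = some L[nj] := by
    rw [pyGet?_norm hj, ← hnj]; exact List.getElem?_eq_getElem hnjLt
  simp only [pvUnionA, hf1, hf2, pvRelabelB, hgetLi, hgetLj]
  by_cases hab : L[ni] = L[nj]
  · rw [if_neg (not_not_intro hab), if_neg (not_not_intro hab)]
    exact ⟨p2, rfl, hlen2, hB2, fun k h => rootGo_mono (by omega) (hS2 k h)⟩
  · rw [if_pos hab, if_pos hab]
    have hpropa := rootGo_props hB (by rw [hlen]; exact hniLt) (hsim ni hniLt)
    have hpropb := rootGo_props hB (by rw [hlen]; exact hnjLt) (hsim nj hnjLt)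
    obtain ⟨ha0, halt, hafix⟩ := hpropa
    obtain ⟨hb0, hblt, hbfix⟩ := hpropb
    set a := L[ni] with hadef
    set b := L[nj] with hbdef
    -- the two roots are fixpoints also of p2 (roots are preserved by the finds)
    have hfa2 : p2[a.toNat]? = some a := by
      have h1 : rootGo 1 p a.toNat = some a :=
        rootGo_one.mpr ⟨hafix, (Int.toNat_of_nonneg ha0).symm⟩
      exact (rootGo_one.mp (hp2 _ _ _ (hp1 _ _ _ h1))).1
    have hfb2 : p2[b.toNat]? = some b := by
      have h1 : rootGo 1 p b.toNat = some b :=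
        rootGo_one.mpr ⟨hbfix, (Int.toNat_of_nonneg hb0).symm⟩
      exact (rootGo_one.mp (hp2 _ _ _ (hp1 _ _ _ h1))).1
    have hfa2' : p2[a.toNat]? = some ((a.toNat : Nat) : Int) := by
      rw [hfa2, Int.toNat_of_nonneg ha0]
    have hfb2' : p2[b.toNat]? = some ((b.toNat : Nat) : Int) := by
      rw [hfb2, Int.toNat_of_nonneg hb0]
    have hneN : a.toNat ≠ b.toNat := fun hc => hab (by omega)
    have haLt2 : a.toNat < p2.length := by omega
    have hset : PySem.List.pySet? p2 a b = some (p2.set a.toNat b) := by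
      simp [PySem.List.pySet?, PySem.List.pyIdx?, show a < (p2.length : Int) by omega, ha0]
    rw [hset]
    refine ⟨p2.set a.toNat b, rfl, ?_, ?_, ?_⟩
    · simp [hlen2]
    · intro k hk
      simp only [List.length_set] at hk ⊢
      simp only [List.getElem_set]
      split
      · constructor <;> omega
      · obtain ⟨c1, c2⟩ := hB2 k hk; constructor <;> omega
    · intro k hk
      simp only [List.length_map] at hk
      have := rootGo_set_union hfa2' hfb2' hneN f k L[k] (hS2 k hk)
      rw [Int.toNat_of_nonneg ha0, Int.toNat_of_nonneg hb0] at this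
      rw [this]
      congr 1
      rw [List.getElem_map]

theorem relabel_length (L : List Int) (e : Int × Int) : (pvRelabelB L e).length = L.length := by
  rcases h1 : PySem.List.pyGet? L e.1 with _ | a <;>
    rcases h2 : PySem.List.pyGet? L e.2 with _ | b <;>
      simp only [pvRelabelB, h1, h2]
  split <;> simp

theorem foldl_relabel_length (adjs : List (Int × Int)) (L : List Int) :
    (adjs.foldl pvRelabelB L).length = L.length := by
  induction adjs generalizing L with
  | nil => rfl
  | cons e t ih => rw [List.foldl_cons, ih, relabel_length]

theorem loop_sim (F : Nat) : ∀ (adjs : List (Int × Int)) (f : Nat) (p L : List Int),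
    pvSim f p L →
    (∀ e ∈ adjs, PySem.Raise.InRange L.length e.1 ∧ PySem.Raise.InRange L.length e.2) →
    f + adjs.length + 1 ≤ F →
    pvSim (f + adjs.length)
      (adjs.foldl (fun p ij => match pvUnionA F p ij.1 ij.2 with | some p' => p' | none => p) p)
      (adjs.foldl pvRelabelB L) := by
  intro adjs
  induction adjs with
  | nil => intro f p L hS _ _; simpa using hS
  | cons e t ih =>
    intro f p L hS hAdj hF
    obtain ⟨i, j⟩ := e
    obtain ⟨p1, hu, hS1⟩ := step_union (F := F) hS (hAdj (i, j) List.mem_cons_self).1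
      (hAdj (i, j) List.mem_cons_self).2 (by simp only [List.length_cons] at hF; omega)
    simp only [List.foldl_cons, hu]
    have hrl : (pvRelabelB L (i, j)).length = L.length := relabel_length L (i, j)
    have hres := ih (f+1) p1 (pvRelabelB L (i, j)) hS1
      (fun e' he' => by rw [hrl]; exact hAdj e' (List.mem_cons_of_mem _ he'))
      (by simp only [List.length_cons] at hF; omega)
    have harith : f + (t.length + 1) = (f + 1) + t.length := by omega
    simpa [harith] using hres

theorem dict_append_op (d : PySem.Dict Int (List Int)) (k x : Int) :
    (if d.contains k then d else d.insert k []).modify k [] (fun g => g ++ [x])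
      = d.insert k (d.getD k [] ++ [x]) := by
  by_cases hc : d.contains k = true
  · rw [if_pos hc]
    rfl
  · rw [if_neg hc]
    rw [Bool.not_eq_true] at hc
    have hmem : ∀ p ∈ d.items, (p.1 == (k : Int)) = false := by
      intro p hp
      rw [beq_eq_false_iff_ne]
      intro hpk
      rw [PySem.Dict.contains_eq_decide_mem_keys] at hc
      simp only [decide_eq_false_iff_not] at hc
      exact hc (by simp only [PySem.Dict.keys]; exact hpk ▸ List.mem_map_of_mem hp)
    have hgd : d.getD k [] = [] := PySem.Dict.getD_of_not_contains _ _ hc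
    rw [hgd]
    simp only [PySem.Dict.modify, PySem.Dict.getD_insert_self]
    apply PySem.Dict.ext
    rw [PySem.Dict.items_insert_of_contains _ _ (PySem.Dict.contains_insert_self d k []),
      PySem.Dict.items_insert_of_not_contains _ _ hc,
      PySem.Dict.items_insert_of_not_contains _ _ hc]
    rw [List.map_append]
    congr 1
    · conv_rhs => rw [← List.map_id d.items]
      apply List.map_congr_left
      intro p hp
      simp [hmem p hp]
    · simp

theorem group_fold {F f : Nat} {L : List Int} (hF : f + 1 ≤ F) :
    ∀ (ks : List Nat), (∀ k ∈ ks, k < L.length) → ∀ (p : List Int) (d : PySem.Dict Int (List Int)),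
    pvSim f p L →
    (ks.foldl (fun st (k : Nat) => pvGroupStepA F st (k : Int)) (p, d)).2
      = ks.foldl (fun d (k : Nat) => d.insert (L.getD k 0) (d.getD (L.getD k 0) [] ++ [(k : Int)])) d := by
  intro ks
  induction ks with
  | nil => intro _ p d _; rfl
  | cons k t ih =>
    intro hks p d hS
    obtain ⟨hlen, hB, hsim⟩ := hS
    have hkL : k < L.length := hks k List.mem_cons_self
    obtain ⟨p1, hf1, hl1, hB1, hp1⟩ :=
      pvFind_spec F f p k L[k] hB (by omega) (hsim k hkL) (by omega)
    simp only [List.foldl_cons, pvGroupStepA, hf1]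
    rw [dict_append_op]
    have hgetD : L.getD k 0 = L[k] := List.getD_eq_getElem L 0 hkL
    rw [hgetD]
    exact ih (fun k' hk' => hks k' (List.mem_cons_of_mem _ hk')) p1 _
      ⟨hl1.trans hlen, hB1, fun k' h => hp1 _ _ _ (hsim k' h)⟩

theorem enumerate_eq : ∀ (L : List Int) (s : Int),
    PySem.List.enumerate L s = (List.range L.length).map (fun (k : Nat) => (s + (k : Int), L.getD k 0)) := by
  intro L
  induction L with
  | nil => intro s; simp [PySem.List.enumerate]
  | cons x t ih =>
    intro s
    rw [show PySem.List.enumerate (x :: t) s = (s, x) :: PySem.List.enumerate t (s + 1) from rfl]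
    rw [ih (s + 1)]
    simp only [List.length_cons, List.range_succ_eq_map, List.map_cons, List.map_map]
    congr 1
    · simp
    · apply List.map_congr_left
      intro k _
      simp only [Function.comp_apply, List.getD_cons_succ, Prod.mk.injEq]
      exact ⟨by push_cast; ring, trivial⟩

theorem sim_init (n : Nat) : pvSim 1 (PySem.List.pyRange 0 n 1) (PySem.List.pyRange 0 n 1) := by
  have hlen : (PySem.List.pyRange 0 (n : Int) 1).length = n := by
    rw [PySem.List.length_pyRange_one]; simp
  have hget : ∀ (k : Nat), k < n → (PySem.List.pyRange 0 (n : Int) 1)[k]? = some (k : Int) := by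
    intro k hk
    rw [PySem.List.getElem?_pyRange_one, if_pos (by simpa using hk)]
    simp
  refine ⟨rfl, ?_, ?_⟩
  · intro k hk
    rw [hlen] at hk
    have := hget k hk
    rw [List.getElem?_eq_getElem (by omega)] at this
    have hv := (Option.some.injEq _ _).mp this
    rw [hlen, hv]
    constructor <;> omega
  · intro k hk
    rw [hlen] at hk
    have hval : (PySem.List.pyRange 0 (n : Int) 1)[k] = (k : Int) := by
      have := hget k hk
      rw [List.getElem?_eq_getElem (by omega)] at this
      exact (Option.some.injEq _ _).mp this
    rw [hval]
    exact rootGo_one.mpr ⟨hval ▸ hget k hk, rfl⟩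

-- ===== VERDICT (by name: the statement is the Claim_ definition above) =====
theorem cluster_bars_py_spec : Claim_equal_cluster_bars_py := by
  unfold Claim_equal_cluster_bars_py
  intro bars adjacencies _ hPre
  unfold Spec_cluster_bars_py
  simp only [cluster_bars_py, cluster_bars_py_alt]
  set n := bars.length with hn
  set m := adjacencies.length with hm
  set L0 : List Int := PySem.List.pyRange 0 (n : Int) 1 with hL0
  have hlenL0 : L0.length = n := by rw [hL0, PySem.List.length_pyRange_one]; simp
  have hPre' : ∀ e ∈ adjacencies, PySem.Raise.InRange L0.length e.1 ∧ PySem.Raise.InRange L0.length e.2 := by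
    intro e he; rw [hlenL0]; exact hPre e he
  have hloop := loop_sim (m + 2) adjacencies 1 L0 L0 (sim_init n) hPre' (by omega)
  set LU := adjacencies.foldl pvRelabelB L0 with hLU
  have hlenLU : LU.length = n := by rw [hLU, foldl_relabel_length]; exact hlenL0
  set pU := adjacencies.foldl
    (fun p ij => match pvUnionA (m + 2) p ij.1 ij.2 with | some p' => p' | none => p) L0 with hpU
  have hrange : PySem.List.pyRange 0 (n : Int) 1 = (List.range n).map (fun (k : Nat) => (k : Int)) := by
    rw [PySem.List.pyRange_one]; simp
  have hA : ((PySem.List.pyRange 0 (n : Int) 1).foldl (pvGroupStepA (m + 2)) (pU, PySem.Dict.empty)).2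
      = (List.range n).foldl
          (fun d (k : Nat) => d.insert (LU.getD k 0) (d.getD (LU.getD k 0) [] ++ [(k : Int)]))
          PySem.Dict.empty := by
    rw [hrange, List.foldl_map]
    exact group_fold (by omega) (List.range n)
      (fun k hk => by rw [hlenLU]; exact List.mem_range.mp hk) pU _ hloop
  have hBeq : (PySem.List.enumerate LU 0).foldl
        (fun (d : PySem.Dict Int (List Int)) il => d.insert il.2 (d.getD il.2 [] ++ [il.1]))
        PySem.Dict.empty
      = (List.range n).foldl
          (fun d (k : Nat) => d.insert (LU.getD k 0) (d.getD (LU.getD k 0) [] ++ [(k : Int)]))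
          PySem.Dict.empty := by
    rw [enumerate_eq LU 0, hlenLU, List.foldl_map]
    simp only [zero_add]
  rw [hA, hBeq]
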